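-- pv_equiv track=rewrite | github.com/antilectual/CodingPractice | LeetCode/476. Number Complement.py | bitwiseComplement
-- ===== SOURCE A (Python) =====
-- def bitwiseComplement(N: int) -> int:
--     count = 0
--     result = 0
--     if N == 0:
--         return 1
--     while N > 0:
--         result += (((N % 2) ^ 1) << count)
--         count += 1
--         N //= 2
--     return result
-- ===== SOURCE B (Python) =====
-- def bitwiseComplement(N: int) -> int:
--     if N <= 0:
--         return 1 if N == 0 else 0
--     return N ^ ((1 << N.bit_length()) - 1)
-- ===== Notes on version B (the rewrite author's own statement) =====
-- stated objective: simpler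
-- what changed: Replaces the bit-by-bit accumulation loop with a single closed-form XOR against the all-ones mask of N's bit width (mask = (1 << N.bit_length()) - 1); the non-positive cases (1 for 0, 0 for negatives, where A's loop never runs) are handled by one guard.
import Mathlib
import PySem

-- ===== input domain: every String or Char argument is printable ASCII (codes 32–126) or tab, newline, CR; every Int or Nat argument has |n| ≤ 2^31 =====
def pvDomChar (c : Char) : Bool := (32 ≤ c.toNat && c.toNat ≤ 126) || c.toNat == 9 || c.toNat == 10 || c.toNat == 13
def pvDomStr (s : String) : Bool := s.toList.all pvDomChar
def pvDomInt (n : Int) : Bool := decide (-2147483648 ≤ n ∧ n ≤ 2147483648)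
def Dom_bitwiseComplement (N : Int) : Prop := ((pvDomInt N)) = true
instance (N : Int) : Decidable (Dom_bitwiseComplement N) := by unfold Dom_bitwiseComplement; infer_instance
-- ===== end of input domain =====

-- B replaces A's bit-by-bit accumulation loop with one closed-form XOR against the
-- all-ones mask of N's bit width (objective: simpler).

-- ===== PORT A =====
-- the 'while N > 0' loop: state (N, count, result)
def pvLoopA (N : Int) (count : Nat) (result : Int) : Int :=
  if h : 0 < N then
    pvLoopA (PySem.Int.floordiv N 2) (count + 1)
      (result + (PySem.Int.bxor (PySem.Int.mod N 2) 1) <<< count)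
  else result
  termination_by N.toNat
  decreasing_by
    have h2 : PySem.Int.floordiv N 2 = N / 2 := PySem.Int.floordiv_eq_ediv_of_pos (by omega)
    rw [h2]; omega

def bitwiseComplement (N : Int) : Int :=
  if N = 0 then 1
  else pvLoopA N 0 0

-- ===== PORT B =====
def bitwiseComplement_alt (N : Int) : Int :=
  if N ≤ 0 then (if N = 0 then 1 else 0)
  else PySem.Int.bxor N (((1 : Int) <<< PySem.Int.bitLength N) - 1)

-- ===== PRECONDITION & SPEC =====
def Spec_bitwiseComplement (N : Int) (out : Int) : Prop := out = bitwiseComplement_alt N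
instance (N : Int) (out : Int) : Decidable (Spec_bitwiseComplement N out) := by unfold Spec_bitwiseComplement; infer_instance

-- ===== CLAIM (what is proved, stated in full; the proofs are below) =====
def Claim_equal_bitwiseComplement : Prop := ∀ (N : Int), Dom_bitwiseComplement N → Spec_bitwiseComplement N (bitwiseComplement N)

-- ===== LEMMAS AND PROOFS =====

-- size halves: for positive n, size n = size (n / 2) + 1
theorem pv_size_div2 (n : Nat) (h : 0 < n) : n.size = (n / 2).size + 1 := by
  rcases Nat.eq_zero_or_pos (n / 2) with hz | hz
  · have hn1 : n = 1 := by omega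
    subst hn1; simp
  · apply Nat.le_antisymm
    · rw [Nat.size_le]
      have h1 : n / 2 < 2 ^ (n / 2).size := Nat.lt_size_self _
      have h2 : 2 ^ ((n / 2).size + 1) = 2 * 2 ^ (n / 2).size := by ring
      omega
    · have hs : 0 < (n / 2).size := Nat.size_pos.mpr hz
      have h1 : 2 ^ ((n / 2).size - 1) ≤ n / 2 := Nat.lt_size.mp (by omega)
      have h2 : 2 ^ (n / 2).size = 2 * 2 ^ ((n / 2).size - 1) := by
        conv_lhs => rw [show (n / 2).size = ((n / 2).size - 1) + 1 by omega]
        ring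
      have : (n / 2).size < n.size := Nat.lt_size.mpr (by omega)
      omega

-- PySem.Int.bitLength on a Nat cast is Nat.size
theorem pv_bitLength_eq_size (n : Nat) : PySem.Int.bitLength (n : Int) = n.size := by
  induction n using Nat.strong_induction_on with
  | _ n ih =>
    rcases Nat.eq_zero_or_pos n with h0 | h0
    · subst h0; simp [PySem.Int.bitLength_zero]
    · rw [PySem.Int.bitLength_natCast (by omega), ih (n / 2) (by omega),
        pv_size_div2 n h0]

-- the loop computes r + 2^c * (n ^^^ mask) for positive n
theorem pv_loopA_eq (n : Nat) : ∀ (c : Nat) (r : Int), 0 < n →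
    pvLoopA (n : Int) c r = r + (2 ^ c : Int) * ((n ^^^ (2 ^ n.size - 1) : Nat) : Int) := by
  induction n using Nat.strong_induction_on with
  | _ n ih =>
    intro c r hn
    rw [pvLoopA]
    have hpos : (0 : Int) < (n : Int) := by exact_mod_cast hn
    rw [dif_pos hpos]
    have hfd : PySem.Int.floordiv (n : Int) 2 = ((n / 2 : Nat) : Int) := by
      exact_mod_cast PySem.Int.floordiv_natCast n 2
    have hmd : PySem.Int.mod (n : Int) 2 = ((n % 2 : Nat) : Int) := by
      exact_mod_cast PySem.Int.mod_natCast n 2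
    have hbx : PySem.Int.bxor ((n % 2 : Nat) : Int) 1 = ((n % 2 ^^^ 1 : Nat) : Int) := by
      exact_mod_cast PySem.Int.bxor_natCast (n % 2) 1
    rw [hfd, hmd, hbx]
    have hsize : n.size = (n / 2).size + 1 := pv_size_div2 n hn
    have hxd : (n ^^^ (2 ^ n.size - 1)) / 2 = (n / 2) ^^^ (2 ^ (n / 2).size - 1) := by
      rw [Nat.xor_div_two]
      congr 1
      have : 2 ^ n.size = 2 * 2 ^ (n / 2).size := by rw [hsize]; ring
      omega
    have hxm : (n ^^^ (2 ^ n.size - 1)) % 2 = (n + (2 ^ n.size - 1)) % 2 :=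
      Nat.xor_mod_two_eq
    have hpow : 2 ^ n.size = 2 * 2 ^ (n / 2).size := by rw [hsize]; ring
    have hpowpos : 0 < 2 ^ (n / 2).size := Nat.two_pow_pos _
    have hdm := Nat.div_add_mod (n ^^^ (2 ^ n.size - 1)) 2
    have hdm' := Nat.div_add_mod n 2
    -- value of the xor-with-1 of the low bit
    have hbit : (n % 2 ^^^ 1) = (n ^^^ (2 ^ n.size - 1)) % 2 := by
      rw [hxm]
      have h2 : n % 2 = 0 ∨ n % 2 = 1 := by omega
      rcases h2 with h2 | h2 <;> rw [h2] <;> simp <;> omega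
    rcases Nat.eq_zero_or_pos (n / 2) with hz | hz
    · -- n = 1: loop stops next iteration
      have hn1 : n = 1 := by omega
      subst hn1
      rw [pvLoopA]
      norm_num
    · rw [ih (n / 2) (by omega) (c + 1) _ hz]
      rw [Int.shiftLeft_eq]
      have hX : n ^^^ (2 ^ n.size - 1) = 2 * (n / 2 ^^^ (2 ^ (n / 2).size - 1)) + (n % 2 ^^^ 1) := by
        omega
      rw [hX]
      push_cast
      ring

-- ===== VERDICT (by name: the statement is the Claim_ definition above) =====
theorem bitwiseComplement_spec : Claim_equal_bitwiseComplement := by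
  intro N _
  unfold Spec_bitwiseComplement bitwiseComplement bitwiseComplement_alt
  rcases lt_trichotomy N 0 with hneg | hz | hpos
  · rw [if_neg (by omega), if_pos (by omega), if_neg (by omega)]
    rw [pvLoopA, dif_neg (by omega)]
  · subst hz; simp
  · rw [if_neg (by omega), if_neg (by omega)]
    obtain ⟨n, rfl⟩ : ∃ n : Nat, N = (n : Int) := ⟨N.toNat, by omega⟩
    have hn : 0 < n := by exact_mod_cast hpos
    rw [pv_loopA_eq n 0 0 hn]
    rw [pv_bitLength_eq_size]
    have hsh : ((1 : Int) <<< n.size) - 1 = ((2 ^ n.size - 1 : Nat) : Int) := by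
      rw [Int.shiftLeft_eq]
      have h1 : 0 < 2 ^ n.size := Nat.two_pow_pos _
      push_cast [h1]
      ring
    rw [hsh]
    rw [show PySem.Int.bxor (n : Int) ((2 ^ n.size - 1 : Nat) : Int)
          = ((n ^^^ (2 ^ n.size - 1) : Nat) : Int) from
        by exact_mod_cast PySem.Int.bxor_natCast n (2 ^ n.size - 1)]
    push_cast
    ring
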